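-- pv_equiv track=rewrite | github.com/sojitra-nency/fixmytext-backend | app/services/text_service.py | to_inverse_word_case
-- ===== SOURCE A (Python) =====
-- def to_inverse_word_case(text: str) -> str:
--     result = []
--     for word in text.split(" "):
--         if word:
--             result.append(
--                 word[:-1].lower() + word[-1].upper() if len(word) > 1 else word.upper()
--             )
--         else:
--             result.append(word)
--     return " ".join(result)
-- ===== SOURCE B (Python) =====
-- def to_inverse_word_case(text: str) -> str:
--     n = len(text)
--     out = []
--     for i, ch in enumerate(text):
--         if ch == " ":
--             out.append(ch)
--         elif i + 1 == n or text[i + 1] == " ":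
--             out.append(ch.upper())
--         else:
--             out.append(ch.lower())
--     return "".join(out)
-- ===== Notes on version B (the rewrite author's own statement) =====
-- stated objective: alternative
-- what changed: Replaces the split-into-words / per-word rebuild / join pipeline by a single character-level pass that decides each character's case from a one-character lookahead: a word's last character is uppercased, other word characters lowercased, and space separators are copied through.
import Mathlib
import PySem

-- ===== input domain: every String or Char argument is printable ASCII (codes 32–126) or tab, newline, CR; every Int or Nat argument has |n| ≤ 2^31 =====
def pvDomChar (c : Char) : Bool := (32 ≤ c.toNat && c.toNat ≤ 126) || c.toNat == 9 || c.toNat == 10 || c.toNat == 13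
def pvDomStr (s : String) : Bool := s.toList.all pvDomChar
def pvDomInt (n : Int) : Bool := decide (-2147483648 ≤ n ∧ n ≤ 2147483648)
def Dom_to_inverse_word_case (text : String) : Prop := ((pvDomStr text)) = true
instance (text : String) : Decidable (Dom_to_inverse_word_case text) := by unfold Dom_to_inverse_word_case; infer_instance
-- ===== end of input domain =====

-- B replaces A's split(" ")/per-word rebuild/join pipeline by a single character-level
-- pass with one-character lookahead (objective: alternative decomposition, same cost).

-- ===== PORT A =====
-- the expression appended per word: word[:-1].lower() + word[-1].upper() if len(word) > 1 else word.upper()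
-- (word[-1] is ported with pyGetD; it is guarded by len(word) > 1, so the index is in range)
def pvAWord (word : List Char) : List Char :=
  if word ≠ [] then
    (if 1 < word.length then
       PySem.Chars.lower (PySem.List.slice word none (some (-1))) ++
         PySem.Chars.upper [PySem.List.pyGetD word (-1) ' ']
     else PySem.Chars.upper word)
  else word

def to_inverse_word_case (text : String) : String :=
  let result := (PySem.Chars.splitOn text.toList [' ']).foldl
    (fun result word => result ++ [pvAWord word]) []
  String.ofList (PySem.Chars.join [' '] result)

-- ===== PORT B =====
-- one pass: space copied; word char uppercased iff it is the last char of the string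
-- or the next char is a space, else lowercased
def pvAltGo : List Char → List Char
  | [] => []
  | c :: rest =>
    if c = ' ' then c :: pvAltGo rest
    else
      match rest with
      | [] => PySem.Chars.upperChar c :: pvAltGo rest
      | d :: _ =>
        if d = ' ' then PySem.Chars.upperChar c :: pvAltGo rest
        else PySem.Chars.lowerChar c :: pvAltGo rest

def to_inverse_word_case_alt (text : String) : String :=
  String.ofList (pvAltGo text.toList)

-- ===== PRECONDITION & SPEC =====
def Spec_to_inverse_word_case (text : String) (out : String) : Prop := out = to_inverse_word_case_alt text
instance (text : String) (out : String) : Decidable (Spec_to_inverse_word_case text out) := by unfold Spec_to_inverse_word_case; infer_instance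

-- ===== CLAIM =====
def Claim_equal_to_inverse_word_case : Prop := ∀ (text : String), Dom_to_inverse_word_case text → Spec_to_inverse_word_case text (to_inverse_word_case text)

-- ===== LEMMAS AND PROOFS =====

-- structural form of text.split(" ")
def pvSplit1 : List Char → List (List Char)
  | [] => [[]]
  | c :: r => if c = ' ' then [] :: pvSplit1 r else (pvSplit1 r).modifyHead (c :: ·)

theorem pvSplit1_ne_nil : ∀ l : List Char, pvSplit1 l ≠ []
  | [] => by simp [pvSplit1]
  | c :: r => by
    have := pvSplit1_ne_nil r
    by_cases hc : c = ' ' <;> simp [pvSplit1, hc]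
    cases h : pvSplit1 r with
    | nil => exact absurd h this
    | cons a t => simp

theorem pv_go_eq : ∀ (fuel : Nat) (l cur : List Char) (acc : List (List Char)),
    l.length < fuel →
    PySem.Chars.splitOn.go [' '] fuel l cur acc
      = acc.reverse ++ (pvSplit1 l).modifyHead (cur.reverse ++ ·) := by
  intro fuel
  induction fuel with
  | zero => intro l cur acc h; omega
  | succ fuel ih =>
    intro l cur acc h
    cases l with
    | nil =>
      rw [PySem.Chars.splitOn.go.eq_def]
      simp [pvSplit1]
    | cons c rest =>
      have hstep : PySem.Chars.splitOn.go [' '] (fuel+1) (c :: rest) cur acc =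
          (if [' '].isPrefixOf (c :: rest) then
             PySem.Chars.splitOn.go [' '] fuel rest [] (cur.reverse :: acc)
           else PySem.Chars.splitOn.go [' '] fuel rest (c :: cur) acc) := rfl
      rw [hstep]
      simp only [List.length_cons] at h
      by_cases hc : c = ' '
      · subst hc
        rw [if_pos (by simp [List.isPrefixOf])]
        rw [ih rest [] (cur.reverse :: acc) (by omega)]
        simp only [pvSplit1, if_pos]
        cases h' : pvSplit1 rest with
        | nil => exact absurd h' (pvSplit1_ne_nil rest)
        | cons a t => simp
      · rw [if_neg (by simp [List.isPrefixOf]; exact fun he => absurd he.symm hc)]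
        rw [ih rest (c :: cur) acc (by omega)]
        simp only [pvSplit1, if_neg hc, List.modifyHead_modifyHead]
        cases h' : pvSplit1 rest with
        | nil => exact absurd h' (pvSplit1_ne_nil rest)
        | cons a t => simp [Function.comp]

theorem pv_splitOn_eq (l : List Char) : PySem.Chars.splitOn l [' '] = pvSplit1 l := by
  show PySem.Chars.splitOn.go [' '] (l.length + 1) l [] [] = pvSplit1 l
  rw [pv_go_eq (l.length + 1) l [] [] (by omega)]
  cases h : pvSplit1 l with
  | nil => exact absurd h (pvSplit1_ne_nil l)
  | cons a t => simp

theorem pvAWord_nil : pvAWord [] = [] := by simp [pvAWord]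

theorem pvAWord_cons (c : Char) (x : List Char) (hx : x ≠ []) :
    pvAWord (c :: x) = PySem.Chars.lowerChar c :: pvAWord x := by
  have hlen : 1 < (c :: x).length := by
    cases x with | nil => exact absurd rfl hx | cons _ _ => simp
  have hget : PySem.List.pyGetD (c :: x) (-1) ' ' = x.getLast hx := by
    rw [PySem.List.pyGetD_neg_one (c :: x) ' ' (by simp)]
    exact List.getLast_cons hx
  have h1 : pvAWord (c :: x) =
      PySem.Chars.lower (c :: x).dropLast ++
        PySem.Chars.upper [PySem.List.pyGetD (c :: x) (-1) ' '] := by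
    unfold pvAWord
    rw [if_pos (show (c :: x) ≠ [] by simp), if_pos hlen, PySem.List.slice_to_neg_one]
  rw [h1, hget, List.dropLast_cons_of_ne_nil hx]
  cases x with
  | nil => exact absurd rfl hx
  | cons e t =>
    cases t with
    | nil => simp [pvAWord, PySem.Chars.lower, PySem.Chars.upper]
    | cons f t' =>
      have hget2 : PySem.List.pyGetD (e :: f :: t') (-1) ' ' = (e :: f :: t').getLast (by simp) :=
        PySem.List.pyGetD_neg_one _ ' ' (by simp)
      simp [pvAWord, PySem.List.slice_to_neg_one, hget2, PySem.Chars.lower]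

-- join [' '] ((a :: p) :: xs) pulls the first character out
theorem pv_join_cons_elem (a : Char) (p : List Char) (xs : List (List Char)) :
    PySem.Chars.join [' '] ((a :: p) :: xs) = a :: PySem.Chars.join [' '] (p :: xs) := by
  cases xs with
  | nil => rw [PySem.Chars.join_singleton, PySem.Chars.join_singleton]
  | cons q rest =>
    rw [PySem.Chars.join_cons_cons, PySem.Chars.join_cons_cons]
    simp

theorem pv_main : ∀ l : List Char,
    PySem.Chars.join [' '] ((pvSplit1 l).map pvAWord) = pvAltGo l := by
  intro l
  induction l with
  | nil => simp [pvSplit1, pvAltGo, pvAWord_nil, PySem.Chars.join_singleton]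
  | cons c r ih =>
    by_cases hc : c = ' '
    · subst hc
      have hsplit : pvSplit1 (' ' :: r) = [] :: pvSplit1 r := by simp [pvSplit1]
      have halt : pvAltGo (' ' :: r) = ' ' :: pvAltGo r := by simp [pvAltGo]
      rw [hsplit, halt, List.map_cons, pvAWord_nil]
      obtain ⟨a, t, h⟩ : ∃ a t, (pvSplit1 r).map pvAWord = a :: t := by
        cases h' : pvSplit1 r with
        | nil => exact absurd h' (pvSplit1_ne_nil r)
        | cons a t => exact ⟨pvAWord a, t.map pvAWord, by simp⟩
      rw [h, PySem.Chars.join_cons_cons]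
      rw [h] at ih
      simp [ih]
    · cases hr : r with
      | nil =>
        have hsplit : pvSplit1 [c] = [[c]] := by simp [pvSplit1, hc]
        have hw : pvAWord [c] = [PySem.Chars.upperChar c] := by
          simp [pvAWord, PySem.Chars.upper]
        have halt : pvAltGo [c] = [PySem.Chars.upperChar c] := by simp [pvAltGo, hc]
        rw [hsplit, List.map_cons, List.map_nil, hw, PySem.Chars.join_singleton, halt]
      | cons d r' =>
        subst hr
        by_cases hd : d = ' '
        · subst hd
          have hsplit : pvSplit1 (c :: ' ' :: r') = [c] :: pvSplit1 r' := by
            simp [pvSplit1, hc]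
          have hw : pvAWord [c] = [PySem.Chars.upperChar c] := by
            simp [pvAWord, PySem.Chars.upper]
          have halt : pvAltGo (c :: ' ' :: r') = PySem.Chars.upperChar c :: pvAltGo (' ' :: r') := by
            simp [pvAltGo, hc]
          obtain ⟨m, T, hm⟩ : ∃ m T, (pvSplit1 r').map pvAWord = m :: T := by
            cases h' : pvSplit1 r' with
            | nil => exact absurd h' (pvSplit1_ne_nil r')
            | cons a t => exact ⟨pvAWord a, t.map pvAWord, by simp⟩
          have hsplit2 : pvSplit1 (' ' :: r') = [] :: pvSplit1 r' := by simp [pvSplit1]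
          rw [hsplit2, List.map_cons, pvAWord_nil, hm] at ih
          rw [hsplit, List.map_cons, hw, hm, halt]
          rw [show [PySem.Chars.upperChar c] = PySem.Chars.upperChar c :: ([] : List Char) from rfl]
          rw [pv_join_cons_elem, ih]
        · obtain ⟨h', T, hsp⟩ : ∃ h' T, pvSplit1 r' = h' :: T := by
            cases h'' : pvSplit1 r' with
            | nil => exact absurd h'' (pvSplit1_ne_nil r')
            | cons a t => exact ⟨_, _, rfl⟩
          have hsplit : pvSplit1 (c :: d :: r') = (c :: d :: h') :: T := by
            simp [pvSplit1, hc, hd, hsp]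
          have hsplit2 : pvSplit1 (d :: r') = (d :: h') :: T := by
            simp [pvSplit1, hd, hsp]
          have halt : pvAltGo (c :: d :: r') = PySem.Chars.lowerChar c :: pvAltGo (d :: r') := by
            simp [pvAltGo, hc, hd]
          rw [hsplit2, List.map_cons] at ih
          rw [hsplit, List.map_cons, pvAWord_cons c (d :: h') (by simp),
            pv_join_cons_elem, ih, halt]

-- ===== VERDICT =====
theorem to_inverse_word_case_spec : Claim_equal_to_inverse_word_case := by
  intro text _
  unfold Spec_to_inverse_word_case to_inverse_word_case to_inverse_word_case_alt
  simp only [pv_splitOn_eq, PySem.List.foldl_append_singleton_eq_map, List.nil_append, pv_main]
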